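/- GENERATED by tools/mkfinal.gif.py from Gif/Assembly.lean — re-run it when the units change.
  THE TYPE-LEVEL CHAIN, WITHOUT ANY LEAF'S PROOF: `Gif.gif_stays_in_code_of_leaves` = the end theorem with every unit that walks machine code (155 LEAVES: whole
  functions and segments) and the stub as HYPOTHESES. What is proved here: the compositions (segments ⇒ function: Gif/Spec/Proved/
  *_COMPOSITION.lean), the bottom-up order (Gif/Assembly.lean `closed_of`), the image facts and the end (Gif/Final.lean). The theorem
  WITHOUT hypotheses is Gif/FinalTheorem.lean (`Gif.gif_stays_in_code`: the accepted proofs of the leaves plugged in). -/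
import Gif.Final
import Gif.Assembly
namespace Gif
open X86 X86.User Asan ProgX

/-- **The giflib decoder never trips the address sanitizer, and control never leaves the text window** — GIVEN the statements of
the 155 leaf units and of the stub. -/
theorem gif_stays_in_code_of_leaves
    (p_DGifBufferedInput_1 : Gif.Spec.DGifBufferedInput_1.Statement)
    (p_DGifBufferedInput_E : Gif.Spec.DGifBufferedInput_E.Statement)
    (p_DGifCloseFile_5 : Gif.Spec.DGifCloseFile_5.Statement)
    (p_DGifDecompressInput_1 : Gif.Spec.DGifDecompressInput_1.Statement)
    (p_DGifDecompressInput_3 : Gif.Spec.DGifDecompressInput_3.Statement)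
    (p_DGifDecompressInput_E : Gif.Spec.DGifDecompressInput_E.Statement)
    (p_DGifDecompressInput_P : Gif.Spec.DGifDecompressInput_P.Statement)
    (p_DGifDecompressLine_1 : Gif.Spec.DGifDecompressLine_1.Statement)
    (p_DGifDecompressLine_10 : Gif.Spec.DGifDecompressLine_10.Statement)
    (p_DGifDecompressLine_11 : Gif.Spec.DGifDecompressLine_11.Statement)
    (p_DGifDecompressLine_12 : Gif.Spec.DGifDecompressLine_12.Statement)
    (p_DGifDecompressLine_13 : Gif.Spec.DGifDecompressLine_13.Statement)
    (p_DGifDecompressLine_2 : Gif.Spec.DGifDecompressLine_2.Statement)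
    (p_DGifDecompressLine_4 : Gif.Spec.DGifDecompressLine_4.Statement)
    (p_DGifDecompressLine_5 : Gif.Spec.DGifDecompressLine_5.Statement)
    (p_DGifDecompressLine_6 : Gif.Spec.DGifDecompressLine_6.Statement)
    (p_DGifDecompressLine_7 : Gif.Spec.DGifDecompressLine_7.Statement)
    (p_DGifDecompressLine_E : Gif.Spec.DGifDecompressLine_E.Statement)
    (p_DGifDecompressLine_P : Gif.Spec.DGifDecompressLine_P.Statement)
    (p_DGifDecreaseImageCounter_1 : Gif.Spec.DGifDecreaseImageCounter_1.Statement)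
    (p_DGifDecreaseImageCounter_E : Gif.Spec.DGifDecreaseImageCounter_E.Statement)
    (p_DGifGetCodeNext_E : Gif.Spec.DGifGetCodeNext_E.Statement)
    (p_DGifGetCodeNext_P : Gif.Spec.DGifGetCodeNext_P.Statement)
    (p_DGifGetExtensionNext_E : Gif.Spec.DGifGetExtensionNext_E.Statement)
    (p_DGifGetExtensionNext_P : Gif.Spec.DGifGetExtensionNext_P.Statement)
    (p_DGifGetExtension_E : Gif.Spec.DGifGetExtension_E.Statement)
    (p_DGifGetExtension_P : Gif.Spec.DGifGetExtension_P.Statement)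
    (p_DGifGetImageDesc_3 : Gif.Spec.DGifGetImageDesc_3.Statement)
    (p_DGifGetImageDesc_4 : Gif.Spec.DGifGetImageDesc_4.Statement)
    (p_DGifGetImageDesc_6 : Gif.Spec.DGifGetImageDesc_6.Statement)
    (p_DGifGetImageDesc_E : Gif.Spec.DGifGetImageDesc_E.Statement)
    (p_DGifGetImageHeader_5 : Gif.Spec.DGifGetImageHeader_5.Statement)
    (p_DGifGetImageHeader_E : Gif.Spec.DGifGetImageHeader_E.Statement)
    (p_DGifGetImageHeader_P : Gif.Spec.DGifGetImageHeader_P.Statement)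
    (p_DGifGetLine_1 : Gif.Spec.DGifGetLine_1.Statement)
    (p_DGifGetLine_E : Gif.Spec.DGifGetLine_E.Statement)
    (p_DGifGetLine_P : Gif.Spec.DGifGetLine_P.Statement)
    (p_DGifGetPrefixChar : Gif.Spec.DGifGetPrefixChar.Statement)
    (p_DGifGetRecordType_2 : Gif.Spec.DGifGetRecordType_2.Statement)
    (p_DGifGetRecordType_E : Gif.Spec.DGifGetRecordType_E.Statement)
    (p_DGifGetRecordType_P : Gif.Spec.DGifGetRecordType_P.Statement)
    (p_DGifGetScreenDesc_3 : Gif.Spec.DGifGetScreenDesc_3.Statement)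
    (p_DGifGetScreenDesc_6 : Gif.Spec.DGifGetScreenDesc_6.Statement)
    (p_DGifGetScreenDesc_E : Gif.Spec.DGifGetScreenDesc_E.Statement)
    (p_DGifGetScreenDesc_P : Gif.Spec.DGifGetScreenDesc_P.Statement)
    (p_DGifGetWord_E : Gif.Spec.DGifGetWord_E.Statement)
    (p_DGifGetWord_P : Gif.Spec.DGifGetWord_P.Statement)
    (p_DGifOpen_1 : Gif.Spec.DGifOpen_1.Statement)
    (p_DGifOpen_2 : Gif.Spec.DGifOpen_2.Statement)
    (p_DGifOpen_E : Gif.Spec.DGifOpen_E.Statement)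
    (p_DGifOpen_P : Gif.Spec.DGifOpen_P.Statement)
    (p_DGifSetupDecompress_2 : Gif.Spec.DGifSetupDecompress_2.Statement)
    (p_DGifSetupDecompress_3 : Gif.Spec.DGifSetupDecompress_3.Statement)
    (p_DGifSetupDecompress_E : Gif.Spec.DGifSetupDecompress_E.Statement)
    (p_DGifSetupDecompress_P : Gif.Spec.DGifSetupDecompress_P.Statement)
    (p_DGifSlurp_1 : Gif.Spec.DGifSlurp_1.Statement)
    (p_DGifSlurp_12 : Gif.Spec.DGifSlurp_12.Statement)
    (p_DGifSlurp_7 : Gif.Spec.DGifSlurp_7.Statement)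
    (p_DGifSlurp_9 : Gif.Spec.DGifSlurp_9.Statement)
    (p_DGifSlurp_E : Gif.Spec.DGifSlurp_E.Statement)
    (p_DGifSlurp_P : Gif.Spec.DGifSlurp_P.Statement)
    (p_GifAddExtensionBlock_2 : Gif.Spec.GifAddExtensionBlock_2.Statement)
    (p_GifAddExtensionBlock_3 : Gif.Spec.GifAddExtensionBlock_3.Statement)
    (p_GifAddExtensionBlock_E : Gif.Spec.GifAddExtensionBlock_E.Statement)
    (p_GifBitSize : Gif.Spec.GifBitSize.Statement)
    (p_GifFreeExtensions_1 : Gif.Spec.GifFreeExtensions_1.Statement)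
    (p_GifFreeExtensions_2 : Gif.Spec.GifFreeExtensions_2.Statement)
    (p_GifFreeMapObject : Gif.Spec.GifFreeMapObject.Statement)
    (p_GifFreeSavedImages_1 : Gif.Spec.GifFreeSavedImages_1.Statement)
    (p_GifFreeSavedImages_2 : Gif.Spec.GifFreeSavedImages_2.Statement)
    (p_GifFreeSavedImages_3 : Gif.Spec.GifFreeSavedImages_3.Statement)
    (p_GifMakeMapObject_1 : Gif.Spec.GifMakeMapObject_1.Statement)
    (p_GifMakeMapObject_2 : Gif.Spec.GifMakeMapObject_2.Statement)
    (p_GifMakeMapObject_E : Gif.Spec.GifMakeMapObject_E.Statement)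
    (p_digest_byte : Gif.Spec.digest_byte.Statement)
    (p_digest_bytes : Gif.Spec.digest_bytes.Statement)
    (p_digest_extensions_E : Gif.Spec.digest_extensions_E.Statement)
    (p_digest_int : Gif.Spec.digest_int.Statement)
    (p_digest_map_1 : Gif.Spec.digest_map_1.Statement)
    (p_digest_map_2 : Gif.Spec.digest_map_2.Statement)
    (p_digest_map_E : Gif.Spec.digest_map_E.Statement)
    (p_gif_decode_1 : Gif.Spec.gif_decode_1.Statement)
    (p_gif_decode_E : Gif.Spec.gif_decode_E.Statement)
    (p_gif_decode_P : Gif.Spec.gif_decode_P.Statement)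
    (p_mem_read : Gif.Spec.mem_read.Statement)
    (p_openbsd_reallocarray : Gif.Spec.openbsd_reallocarray.Statement)
    (p_prog_main_E : Gif.Spec.prog_main_E.Statement)
    (p_prog_main_P : Gif.Spec.prog_main_P.Statement)
    (p_strncmp : Gif.Spec.strncmp.Statement)
    (p_sub_I_65535_1 : Gif.Spec.sub_I_65535_1.Statement)
    (p_DGifCloseFile_1 : Gif.Spec.DGifCloseFile_1.Statement)
    (p_DGifCloseFile_2 : Gif.Spec.DGifCloseFile_2.Statement)
    (p_DGifCloseFile_3 : Gif.Spec.DGifCloseFile_3.Statement)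
    (p_DGifCloseFile_4 : Gif.Spec.DGifCloseFile_4.Statement)
    (p_DGifDecompressLine_14 : Gif.Spec.DGifDecompressLine_14.Statement)
    (p_DGifDecompressLine_15 : Gif.Spec.DGifDecompressLine_15.Statement)
    (p_DGifDecompressLine_8 : Gif.Spec.DGifDecompressLine_8.Statement)
    (p_DGifDecompressLine_9 : Gif.Spec.DGifDecompressLine_9.Statement)
    (p_DGifDecreaseImageCounter_2 : Gif.Spec.DGifDecreaseImageCounter_2.Statement)
    (p_DGifDecreaseImageCounter_3 : Gif.Spec.DGifDecreaseImageCounter_3.Statement)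
    (p_DGifGetImageDesc_2 : Gif.Spec.DGifGetImageDesc_2.Statement)
    (p_DGifOpen_4 : Gif.Spec.DGifOpen_4.Statement)
    (p_DGifSlurp_4 : Gif.Spec.DGifSlurp_4.Statement)
    (p_DGifSlurp_5 : Gif.Spec.DGifSlurp_5.Statement)
    (p_GifAddExtensionBlock_1 : Gif.Spec.GifAddExtensionBlock_1.Statement)
    (p_InternalRead : Gif.Spec.InternalRead.Statement)
    (p_digest_extensions_1 : Gif.Spec.digest_extensions_1.Statement)
    (p_digest_extensions_2 : Gif.Spec.digest_extensions_2.Statement)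
    (p_digest_file_1 : Gif.Spec.digest_file_1.Statement)
    (p_digest_file_2 : Gif.Spec.digest_file_2.Statement)
    (p_digest_file_4 : Gif.Spec.digest_file_4.Statement)
    (p_digest_file_5 : Gif.Spec.digest_file_5.Statement)
    (p_digest_file_7 : Gif.Spec.digest_file_7.Statement)
    (p_gif_decode_5 : Gif.Spec.gif_decode_5.Statement)
    (p_run_ctors : Gif.Spec.run_ctors.Statement)
    (p_DGifBufferedInput_2 : Gif.Spec.DGifBufferedInput_2.Statement)
    (p_DGifBufferedInput_3 : Gif.Spec.DGifBufferedInput_3.Statement)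
    (p_DGifDecompressInput_2 : Gif.Spec.DGifDecompressInput_2.Statement)
    (p_DGifDecompressLine_3 : Gif.Spec.DGifDecompressLine_3.Statement)
    (p_DGifGetCodeNext_1 : Gif.Spec.DGifGetCodeNext_1.Statement)
    (p_DGifGetCodeNext_2 : Gif.Spec.DGifGetCodeNext_2.Statement)
    (p_DGifGetExtensionNext_1 : Gif.Spec.DGifGetExtensionNext_1.Statement)
    (p_DGifGetExtensionNext_2 : Gif.Spec.DGifGetExtensionNext_2.Statement)
    (p_DGifGetExtension_1 : Gif.Spec.DGifGetExtension_1.Statement)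
    (p_DGifGetExtension_2 : Gif.Spec.DGifGetExtension_2.Statement)
    (p_DGifGetImageDesc_5 : Gif.Spec.DGifGetImageDesc_5.Statement)
    (p_DGifGetImageHeader_3 : Gif.Spec.DGifGetImageHeader_3.Statement)
    (p_DGifGetImageHeader_4 : Gif.Spec.DGifGetImageHeader_4.Statement)
    (p_DGifGetLine_2 : Gif.Spec.DGifGetLine_2.Statement)
    (p_DGifGetLine_3 : Gif.Spec.DGifGetLine_3.Statement)
    (p_DGifGetRecordType_1 : Gif.Spec.DGifGetRecordType_1.Statement)
    (p_DGifGetScreenDesc_2 : Gif.Spec.DGifGetScreenDesc_2.Statement)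
    (p_DGifGetScreenDesc_4 : Gif.Spec.DGifGetScreenDesc_4.Statement)
    (p_DGifGetScreenDesc_5 : Gif.Spec.DGifGetScreenDesc_5.Statement)
    (p_DGifGetWord_1 : Gif.Spec.DGifGetWord_1.Statement)
    (p_DGifOpen_3 : Gif.Spec.DGifOpen_3.Statement)
    (p_DGifSetupDecompress_1 : Gif.Spec.DGifSetupDecompress_1.Statement)
    (p_DGifSlurp_10 : Gif.Spec.DGifSlurp_10.Statement)
    (p_DGifSlurp_11 : Gif.Spec.DGifSlurp_11.Statement)
    (p_DGifSlurp_2 : Gif.Spec.DGifSlurp_2.Statement)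
    (p_DGifSlurp_6 : Gif.Spec.DGifSlurp_6.Statement)
    (p_DGifSlurp_8 : Gif.Spec.DGifSlurp_8.Statement)
    (p_digest_file_3 : Gif.Spec.digest_file_3.Statement)
    (p_digest_file_6 : Gif.Spec.digest_file_6.Statement)
    (p_gif_decode_4 : Gif.Spec.gif_decode_4.Statement)
    (p_DGifGetImageHeader_1 : Gif.Spec.DGifGetImageHeader_1.Statement)
    (p_DGifGetImageHeader_2 : Gif.Spec.DGifGetImageHeader_2.Statement)
    (p_DGifGetImageHeader_6 : Gif.Spec.DGifGetImageHeader_6.Statement)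
    (p_DGifGetScreenDesc_1 : Gif.Spec.DGifGetScreenDesc_1.Statement)
    (p_DGifOpen_5 : Gif.Spec.DGifOpen_5.Statement)
    (p_gif_decode_2 : Gif.Spec.gif_decode_2.Statement)
    (p_DGifGetImageDesc_1 : Gif.Spec.DGifGetImageDesc_1.Statement)
    (p_DGifSlurp_3 : Gif.Spec.DGifSlurp_3.Statement)
    (p_gif_decode_3 : Gif.Spec.gif_decode_3.Statement)
    (p_prog_main_1 : Gif.Spec.prog_main_1.Statement)
    (p_start : Gif.Spec.start.Statement) : ProgX.StaysInCode Gif.image :=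
  stays_in_code_of (Closed.closed_of p_DGifBufferedInput_1 p_DGifBufferedInput_E p_DGifCloseFile_5 p_DGifDecompressInput_1 p_DGifDecompressInput_3 p_DGifDecompressInput_E p_DGifDecompressInput_P p_DGifDecompressLine_1 p_DGifDecompressLine_10 p_DGifDecompressLine_11 p_DGifDecompressLine_12 p_DGifDecompressLine_13 p_DGifDecompressLine_2 p_DGifDecompressLine_4 p_DGifDecompressLine_5 p_DGifDecompressLine_6 p_DGifDecompressLine_7 p_DGifDecompressLine_E p_DGifDecompressLine_P p_DGifDecreaseImageCounter_1 p_DGifDecreaseImageCounter_E p_DGifGetCodeNext_E p_DGifGetCodeNext_P p_DGifGetExtensionNext_E p_DGifGetExtensionNext_P p_DGifGetExtension_E p_DGifGetExtension_P p_DGifGetImageDesc_3 p_DGifGetImageDesc_4 p_DGifGetImageDesc_6 p_DGifGetImageDesc_E p_DGifGetImageHeader_5 p_DGifGetImageHeader_E p_DGifGetImageHeader_P p_DGifGetLine_1 p_DGifGetLine_E p_DGifGetLine_P p_DGifGetPrefixChar p_DGifGetRecordType_2 p_DGifGetRecordType_E p_DGifGetRecordType_P p_DGifGetScreenDesc_3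 p_DGifGetScreenDesc_6 p_DGifGetScreenDesc_E p_DGifGetScreenDesc_P p_DGifGetWord_E p_DGifGetWord_P p_DGifOpen_1 p_DGifOpen_2 p_DGifOpen_E p_DGifOpen_P p_DGifSetupDecompress_2 p_DGifSetupDecompress_3 p_DGifSetupDecompress_E p_DGifSetupDecompress_P p_DGifSlurp_1 p_DGifSlurp_12 p_DGifSlurp_7 p_DGifSlurp_9 p_DGifSlurp_E p_DGifSlurp_P p_GifAddExtensionBlock_2 p_GifAddExtensionBlock_3 p_GifAddExtensionBlock_E p_GifBitSize p_GifFreeExtensions_1 p_GifFreeExtensions_2 p_GifFreeMapObject p_GifFreeSavedImages_1 p_GifFreeSavedImages_2 p_GifFreeSavedImages_3 p_GifMakeMapObject_1 p_GifMakeMapObject_2 p_GifMakeMapObject_E p_digest_byte p_digest_bytes p_digest_extensions_E p_digest_int p_digest_map_1 p_digest_map_2 p_digest_map_E p_gif_decode_1 p_gif_decode_E p_gif_decode_P p_mem_read p_openbsd_reallocarray p_prog_main_E p_prog_main_P p_strncmp p_sub_I_65535_1 p_DGifCloseFile_1 p_DGifCloseFile_2 p_DGifCloseFile_3 p_DGifCloseFile_4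 p_DGifDecompressLine_14 p_DGifDecompressLine_15 p_DGifDecompressLine_8 p_DGifDecompressLine_9 p_DGifDecreaseImageCounter_2 p_DGifDecreaseImageCounter_3 p_DGifGetImageDesc_2 p_DGifOpen_4 p_DGifSlurp_4 p_DGifSlurp_5 p_GifAddExtensionBlock_1 p_InternalRead p_digest_extensions_1 p_digest_extensions_2 p_digest_file_1 p_digest_file_2 p_digest_file_4 p_digest_file_5 p_digest_file_7 p_gif_decode_5 p_run_ctors p_DGifBufferedInput_2 p_DGifBufferedInput_3 p_DGifDecompressInput_2 p_DGifDecompressLine_3 p_DGifGetCodeNext_1 p_DGifGetCodeNext_2 p_DGifGetExtensionNext_1 p_DGifGetExtensionNext_2 p_DGifGetExtension_1 p_DGifGetExtension_2 p_DGifGetImageDesc_5 p_DGifGetImageHeader_3 p_DGifGetImageHeader_4 p_DGifGetLine_2 p_DGifGetLine_3 p_DGifGetRecordType_1 p_DGifGetScreenDesc_2 p_DGifGetScreenDesc_4 p_DGifGetScreenDesc_5 p_DGifGetWord_1 p_DGifOpen_3 p_DGifSetupDecompress_1 p_DGifSlurp_10 p_DGifSlurp_11 p_DGifSlurp_2 p_DGifSlurp_6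 p_DGifSlurp_8 p_digest_file_3 p_digest_file_6 p_gif_decode_4 p_DGifGetImageHeader_1 p_DGifGetImageHeader_2 p_DGifGetImageHeader_6 p_DGifGetScreenDesc_1 p_DGifOpen_5 p_gif_decode_2 p_DGifGetImageDesc_1 p_DGifSlurp_3 p_gif_decode_3 p_prog_main_1) p_start

end Gif
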